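-- pv_equiv track=rewrite | github.com/hakureii/ai-bot-2.0 | main.py | fix_discord_message
-- ===== SOURCE A (Python) =====
-- def fix_discord_message(message: str):
--     # fix the discord embed issues.
--     special_syms = ["*", "_", "-", "~", "#"]
--     fixed_message = ""
--     for char in message:
--         if char in special_syms:
--             fixed_message += "\\" + char
--         else:
--             fixed_message += char
--     # fix overlapping size for discord limit
--     return fixed_message.split(".\n")
-- ===== SOURCE B (Python) =====
-- def fix_discord_message(message: str):
--     # Single pass over the string: detect the ".\n" separator with one-char
--     # lookahead and flush the current (escaped) segment, instead of building
--     # a fully escaped copy first and splitting it afterwards.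
--     parts = []
--     cur = []
--     i = 0
--     n = len(message)
--     while i < n:
--         c = message[i]
--         if c == "." and i + 1 < n and message[i + 1] == "\n":
--             parts.append("".join(cur))
--             cur = []
--             i += 2
--         elif c in "*_-~#":
--             cur.append("\\")
--             cur.append(c)
--             i += 1
--         else:
--             cur.append(c)
--             i += 1
--     parts.append("".join(cur))
--     return parts
-- ===== Notes on version B (the rewrite author's own statement) =====
-- stated objective: alternative
-- what changed: Replaces A's two-stage pipeline (build a fully escaped copy of the whole string, then split it on '.\n') by a single indexed pass that detects the separator with one-char lookahead and flushes each escaped segment as it goes, never materialising the escaped whole string.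
import Mathlib
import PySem

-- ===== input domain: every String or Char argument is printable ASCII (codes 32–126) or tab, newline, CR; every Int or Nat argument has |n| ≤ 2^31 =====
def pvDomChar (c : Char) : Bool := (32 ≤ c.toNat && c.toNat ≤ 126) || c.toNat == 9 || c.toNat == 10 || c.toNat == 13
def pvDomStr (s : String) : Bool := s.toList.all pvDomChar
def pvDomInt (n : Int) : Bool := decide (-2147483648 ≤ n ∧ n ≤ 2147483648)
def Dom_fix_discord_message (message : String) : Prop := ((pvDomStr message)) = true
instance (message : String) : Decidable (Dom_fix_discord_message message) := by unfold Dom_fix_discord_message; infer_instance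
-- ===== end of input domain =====

-- B replaces A's escape-everything-then-split pipeline by a single pass that
-- detects the ".\n" separator with one-char lookahead and flushes segments as it escapes.

-- ===== PORT A =====
-- literal port of A: fold over the characters, appending '\' + char or char, then split on ".\n"
def fix_discord_message (message : String) : List String :=
  let special_syms : List Char := ['*', '_', '-', '~', '#']
  let fixed_message : List Char :=
    message.toList.foldl
      (fun acc char => if char ∈ special_syms then acc ++ ['\\', char] else acc ++ [char]) []
  (PySem.Chars.splitOn fixed_message ['.', '\n']).map String.ofList

-- ===== PORT B =====
-- the single-pass loop of Source B: on ".\n" flush the current segment, otherwise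
-- append the (escaped) character to the current segment
def fdmGo (l : List Char) (cur : List Char) : List String :=
  match l with
  | [] => [String.ofList cur]
  | c :: rest =>
    if c = '.' ∧ rest.head? = some '\n' then
      String.ofList cur :: fdmGo rest.tail []
    else if c ∈ ['*', '_', '-', '~', '#'] then
      fdmGo rest (cur ++ ['\\', c])
    else
      fdmGo rest (cur ++ [c])
termination_by l.length
decreasing_by all_goals simp [List.length_tail]

def fix_discord_message_alt (message : String) : List String :=
  fdmGo message.toList []

-- ===== PRECONDITION & SPEC =====
def Spec_fix_discord_message (message : String) (out : List String) : Prop := out = fix_discord_message_alt message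
instance (message : String) (out : List String) : Decidable (Spec_fix_discord_message message out) := by unfold Spec_fix_discord_message; infer_instance

-- ===== CLAIM (what is proved, stated in full; the proofs are below) =====
def Claim_equal_fix_discord_message : Prop := ∀ (message : String), Dom_fix_discord_message message → Spec_fix_discord_message message (fix_discord_message message)

-- ===== LEMMAS AND PROOFS =====

-- proof-side model of the escaping A performs character by character
def pvEscape (c : Char) : List Char :=
  if c ∈ ['*', '_', '-', '~', '#'] then ['\\', c] else [c]

-- prepend a list to the first piece (pieces lists are never empty)
def pvConsHead (pre : List Char) : List (List Char) → List (List Char)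
  | p :: ps => (pre ++ p) :: ps
  | [] => [pre]

-- structural model of str.split(".\n")
def pvSplit2 : List Char → List (List Char)
  | [] => [[]]
  | c :: rest =>
    if c = '.' ∧ rest.head? = some '\n' then [] :: pvSplit2 rest.tail
    else pvConsHead [c] (pvSplit2 rest)
termination_by l => l.length
decreasing_by all_goals simp [List.length_tail]

theorem pvSplit2_ne_nil (l : List Char) : pvSplit2 l ≠ [] := by
  cases l with
  | nil => simp [pvSplit2]
  | cons c rest =>
    rw [pvSplit2]
    split
    · simp
    · cases hv : pvSplit2 rest <;> simp [pvConsHead]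

theorem pvSplit2_exists (l : List Char) : ∃ p ps, pvSplit2 l = p :: ps := by
  cases hps : pvSplit2 l with
  | nil => exact absurd hps (pvSplit2_ne_nil l)
  | cons p ps => exact ⟨p, ps, rfl⟩

theorem fix_foldl_eq_flatMap (l : List Char) :
    l.foldl (fun acc char => if char ∈ (['*', '_', '-', '~', '#'] : List Char)
              then acc ++ ['\\', char] else acc ++ [char]) [] = l.flatMap pvEscape := by
  have h : (fun (acc : List Char) (char : Char) =>
      if char ∈ (['*', '_', '-', '~', '#'] : List Char) then acc ++ ['\\', char] else acc ++ [char])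
      = fun acc char => acc ++ pvEscape char := by
    funext acc char
    simp [pvEscape, apply_ite (acc ++ ·)]
  rw [h, PySem.List.foldl_append_eq_flatMap]
  simp

theorem prefix_iff_sep (c : Char) (rest : List Char) :
    ((['.', '\n'] : List Char).isPrefixOf (c :: rest) = true) ↔ (c = '.' ∧ rest.head? = some '\n') := by
  cases rest with
  | nil => simp [List.isPrefixOf]
  | cons d t =>
    simp [List.isPrefixOf]
    constructor
    · rintro ⟨rfl, rfl⟩; exact ⟨rfl, rfl⟩
    · rintro ⟨rfl, h⟩; exact ⟨rfl, h.symm⟩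

-- rewriting equations for pvSplit2
theorem pvSplit2_sep (c : Char) (rest : List Char) (h : c = '.' ∧ rest.head? = some '\n') :
    pvSplit2 (c :: rest) = [] :: pvSplit2 rest.tail := by
  rw [pvSplit2, if_pos h]

theorem pvSplit2_cons (c : Char) (rest : List Char) (h : ¬(c = '.' ∧ rest.head? = some '\n')) :
    pvSplit2 (c :: rest) = pvConsHead [c] (pvSplit2 rest) := by
  rw [pvSplit2, if_neg h]

-- the fuel-based splitOn.go computes pvSplit2
theorem go_eq (fuel : Nat) : ∀ (l cur : List Char) (acc : List (List Char)),
    l.length < fuel →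
    PySem.Chars.splitOn.go ['.', '\n'] fuel l cur acc
      = acc.reverse ++ pvConsHead cur.reverse (pvSplit2 l) := by
  induction fuel with
  | zero => intro l cur acc h; omega
  | succ f ih =>
    intro l cur acc h
    cases l with
    | nil =>
      simp [PySem.Chars.splitOn.go, pvSplit2, pvConsHead]
    | cons c rest =>
      rw [PySem.Chars.splitOn.go]
      by_cases hpre : (['.', '\n'] : List Char).isPrefixOf (c :: rest) = true
      · obtain ⟨rfl, hh⟩ := (prefix_iff_sep c rest).mp hpre
        simp only [hpre, if_true]
        have hdrop : List.drop (['.', '\n'] : List Char).length ('.' :: rest) = rest.tail := by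
          cases rest <;> rfl
        rw [hdrop]
        rw [ih rest.tail [] (List.reverse cur :: acc)
            (by cases rest <;> simp at h ⊢ <;> omega)]
        rw [pvSplit2_sep '.' rest ⟨rfl, hh⟩]
        obtain ⟨p, ps, hp⟩ := pvSplit2_exists rest.tail
        simp [hp, pvConsHead]
      · have hns := (not_iff_not.mpr (prefix_iff_sep c rest)).mp hpre
        simp only [hpre]
        rw [ih rest (c :: cur) acc (by simp at h ⊢; omega)]
        rw [pvSplit2_cons c rest hns]
        obtain ⟨p, ps, hp⟩ := pvSplit2_exists rest
        simp [hp, pvConsHead]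

theorem splitOn_eq_pvSplit2 (l : List Char) :
    PySem.Chars.splitOn l ['.', '\n'] = pvSplit2 l := by
  unfold PySem.Chars.splitOn
  rw [go_eq (l.length + 1) l [] [] (by omega)]
  obtain ⟨p, ps, hp⟩ := pvSplit2_exists l
  simp [hp, pvConsHead]

-- the head of the escaped list is '\n' iff the head of the original is
theorem head_flatMap_escape (l : List Char) :
    (l.flatMap pvEscape).head? = some '\n' ↔ l.head? = some '\n' := by
  cases l with
  | nil => simp
  | cons c rest =>
    by_cases hc : c ∈ (['*', '_', '-', '~', '#'] : List Char)
    · have hne : c ≠ '\n' := by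
        simp only [List.mem_cons, List.not_mem_nil, or_false] at hc
        rcases hc with rfl | rfl | rfl | rfl | rfl <;> decide
      have hc' : c ∈ (['*', '_', '-', '~', '#'] : List Char) := hc
      simp [pvEscape, hc', hne]
    · simp [pvEscape, hc]

-- splitting commutes with escaping: escaping never creates nor destroys a ".\n"
theorem split2_flatMap (l : List Char) :
    pvSplit2 (l.flatMap pvEscape) = (pvSplit2 l).map (·.flatMap pvEscape) := by
  induction l using pvSplit2.induct with
  | case1 => simp [pvSplit2]
  | case2 c rest hsep ih =>
    obtain ⟨rfl, hh⟩ := hsep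
    cases rest with
    | nil => simp at hh
    | cons d t =>
      have hd : d = '\n' := by simpa using hh
      subst hd
      have hdot : pvEscape '.' = ['.'] := by decide
      have hnl : pvEscape '\n' = ['\n'] := by decide
      simp only [List.flatMap_cons, hdot, hnl, List.cons_append, List.nil_append]
      rw [pvSplit2_sep '.' ('\n' :: List.flatMap pvEscape t) ⟨rfl, rfl⟩]
      rw [pvSplit2_sep '.' ('\n' :: t) ⟨rfl, rfl⟩]
      simp only [List.tail_cons, List.map_cons, List.flatMap_nil]
      simp only [List.tail_cons] at ih
      rw [ih]
  | case3 c rest hsep ih =>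
    by_cases hc : c ∈ (['*', '_', '-', '~', '#'] : List Char)
    · have hesc : pvEscape c = ['\\', c] := by simp [pvEscape, hc]
      have hcdot : c ≠ '.' := by
        simp only [List.mem_cons, List.not_mem_nil, or_false] at hc
        rcases hc with rfl | rfl | rfl | rfl | rfl <;> decide
      simp only [List.flatMap_cons, hesc, List.cons_append, List.nil_append]
      rw [pvSplit2_cons '\\' (c :: List.flatMap pvEscape rest) (by simp)]
      rw [pvSplit2_cons c (List.flatMap pvEscape rest) (by simp [hcdot])]
      rw [pvSplit2_cons c rest hsep]
      rw [ih]
      obtain ⟨p, ps, hp⟩ := pvSplit2_exists rest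
      simp [hp, pvConsHead, hesc]
    · have hesc : pvEscape c = [c] := by simp [pvEscape, hc]
      have hcond : ¬(c = '.' ∧ (List.flatMap pvEscape rest).head? = some '\n') := by
        rintro ⟨rfl, hh⟩
        exact hsep ⟨rfl, (head_flatMap_escape rest).mp hh⟩
      simp only [List.flatMap_cons, hesc, List.cons_append, List.nil_append]
      rw [pvSplit2_cons c (List.flatMap pvEscape rest) hcond]
      rw [pvSplit2_cons c rest hsep]
      rw [ih]
      obtain ⟨p, ps, hp⟩ := pvSplit2_exists rest
      simp [hp, pvConsHead, hesc]

-- B's loop computes the escaped pieces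
theorem fdmGo_eq (l : List Char) (cur : List Char) :
    fdmGo l cur
      = (pvConsHead cur ((pvSplit2 l).map (·.flatMap pvEscape))).map String.ofList := by
  induction l, cur using fdmGo.induct with
  | case1 cur => simp [fdmGo, pvSplit2, pvConsHead]
  | case2 cur c rest hsep ih =>
    rw [fdmGo]
    rw [if_pos hsep]
    rw [ih]
    rw [pvSplit2_sep c rest hsep]
    obtain ⟨p, ps, hp⟩ := pvSplit2_exists rest.tail
    simp [hp, pvConsHead]
  | case3 cur c rest hsep hc ih =>
    have hesc : pvEscape c = ['\\', c] := by simp [pvEscape, hc]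
    rw [fdmGo]
    rw [if_neg hsep, if_pos hc]
    rw [ih]
    rw [pvSplit2_cons c rest hsep]
    obtain ⟨p, ps, hp⟩ := pvSplit2_exists rest
    simp [hp, pvConsHead, hesc]
  | case4 cur c rest hsep hc ih =>
    have hesc : pvEscape c = [c] := by simp [pvEscape, hc]
    rw [fdmGo]
    rw [if_neg hsep, if_neg hc]
    rw [ih]
    rw [pvSplit2_cons c rest hsep]
    obtain ⟨p, ps, hp⟩ := pvSplit2_exists rest
    simp [hp, pvConsHead, hesc]

-- ===== VERDICT (by name: the statement is the Claim_ definition above) =====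
theorem fix_discord_message_spec : Claim_equal_fix_discord_message := by
  intro message _
  unfold Spec_fix_discord_message fix_discord_message fix_discord_message_alt
  simp only []
  rw [fix_foldl_eq_flatMap, splitOn_eq_pvSplit2, split2_flatMap, fdmGo_eq]
  obtain ⟨p, ps, hp⟩ := pvSplit2_exists message.toList
  simp [hp, pvConsHead]
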